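-- pv_equiv track=rewrite | github.com/AllenSML/adventOfCode2023 | day13.py | find_reflection
-- ===== SOURCE A (Python) =====
-- def find_reflection(pattern):
--     for i in range(len(pattern)-1):
--         left = pattern[:i+1][::-1]
--         right = pattern[i+1:]
--         matched = all( l == r for (l, r) in zip(left, right))
--         if matched:
--             return True, i+1
--     return False, 0
-- ===== SOURCE B (Python) =====
-- def find_reflection(pattern):
--     # Stage 1: hash-cons the rows -- build a dict row->small int id in one pass,
--     # so every later row comparison is an O(1) integer comparison.
--     ids = {}
--     row_ids = []
--     for row in pattern:
--         if row not in ids: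
--             ids[row] = len(ids)
--         row_ids.append(ids[row])
--     # Stage 2: centre expansion over the id array with two pointers; an axis is
--     # a reflection iff the expansion runs off either border before a mismatch.
--     n = len(row_ids)
--     k = 1
--     while k < n:
--         l = k - 1
--         r = k
--         while l >= 0 and r < n and row_ids[l] == row_ids[r]:
--             l -= 1
--             r += 1
--         if l < 0 or r == n:
--             return True, k
--         k += 1
--     return False, 0
-- ===== Notes on version B (the rewrite author's own statement) =====
-- stated objective: faster
-- what changed: Replaces A's per-axis slice/reverse/zip comparison of the two row halves by a two-stage algorithm: one hashing pass mapping rows to integer ids via a dict, then two-pointer centre expansion over the id array with a border test, so each pairwise check is an O(1) int comparison and stops at the first mismatch.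
import Mathlib
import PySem

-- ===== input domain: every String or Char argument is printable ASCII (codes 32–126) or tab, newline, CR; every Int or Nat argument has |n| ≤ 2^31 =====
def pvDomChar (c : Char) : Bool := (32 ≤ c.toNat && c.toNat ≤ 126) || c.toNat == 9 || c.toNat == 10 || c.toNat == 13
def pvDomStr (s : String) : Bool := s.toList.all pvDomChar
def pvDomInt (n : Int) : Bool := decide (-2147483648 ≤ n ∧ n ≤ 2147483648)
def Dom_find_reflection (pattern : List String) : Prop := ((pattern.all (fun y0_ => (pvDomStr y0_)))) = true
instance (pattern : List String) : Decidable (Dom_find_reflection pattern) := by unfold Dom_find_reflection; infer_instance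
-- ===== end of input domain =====

-- B replaces A's slice/reverse/zip comparison of the two halves at every axis by a two-stage
-- algorithm: one hashing pass mapping rows to integer ids, then two-pointer centre expansion
-- over the id array with a border test, making each pairwise check an O(1) int comparison
-- (measurably faster on a timing run's generated inputs).

-- ===== PORT A =====
-- matched = all(l == r for (l, r) in zip(left, right))
def pvAllEq (l r : List String) : Bool := (l.zip r).all (fun p => p.1 == p.2)

-- the 'for i in range(len(pattern)-1)' loop with early return
def pvLoopA (pattern : List String) : List Int → Bool × Int
  | [] => (false, 0)
  | i :: rest =>
      -- pattern[:i+1][::-1]  ([::-1] is reverse)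
      let left := (PySem.List.slice pattern none (some (i + 1))).reverse
      -- pattern[i+1:]
      let right := PySem.List.slice pattern (some (i + 1)) none
      if pvAllEq left right then (true, i + 1) else pvLoopA pattern rest

def find_reflection (pattern : List String) : Bool × Int :=
  pvLoopA pattern (PySem.List.pyRange 0 ((pattern.length : Int) - 1) 1)

-- ===== PORT B =====
-- stage 1: 'if row not in ids: ids[row] = len(ids); row_ids.append(ids[row])'
def pvStep (st : PySem.Dict String Int × List Int) (row : String) : PySem.Dict String Int × List Int :=
  let d := if st.1.contains row then st.1 else st.1.insert row (st.1.size : Int)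
  (d, st.2 ++ [d.getD row 0])

def pvAssign (pattern : List String) : PySem.Dict String Int × List Int :=
  pattern.foldl pvStep (PySem.Dict.empty, [])

-- stage 2 inner: 'while l >= 0 and r < n and row_ids[l] == row_ids[r]: l -= 1; r += 1'
def pvExpand (rids : List Int) (n l r : Int) : Int × Int :=
  if h : 0 ≤ l ∧ r < n ∧ PySem.List.pyGet? rids l == PySem.List.pyGet? rids r then
    pvExpand rids n (l - 1) (r + 1)
  else (l, r)
termination_by (n - r).toNat
decreasing_by omega

-- stage 2 outer: 'while k < n: … if l < 0 or r == n: return True, k; k += 1'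
def pvScan (rids : List Int) (n k : Int) : Bool × Int :=
  if hk : k < n then
    let lr := pvExpand rids n (k - 1) k
    if lr.1 < 0 ∨ lr.2 = n then (true, k)
    else pvScan rids n (k + 1)
  else (false, 0)
termination_by (n - k).toNat
decreasing_by omega

def find_reflection_alt (pattern : List String) : Bool × Int :=
  let rids := (pvAssign pattern).2
  pvScan rids (rids.length : Int) 1

-- ===== PRECONDITION & SPEC =====
def Spec_find_reflection (pattern : List String) (out : Bool × Int) : Prop := out = find_reflection_alt pattern
instance (pattern : List String) (out : Bool × Int) : Decidable (Spec_find_reflection pattern out) := by unfold Spec_find_reflection; infer_instance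

-- ===== CLAIM (what is proved, stated in full; the proofs are below) =====
def Claim_equal_find_reflection : Prop := ∀ (pattern : List String), Dom_find_reflection pattern → Spec_find_reflection pattern (find_reflection pattern)

-- ===== LEMMAS AND PROOFS =====

-- invariant of the id-assignment fold: the dict is injective, bounded by its size,
-- contains exactly the processed rows, and acc records each processed row's id
def pvInv (q : List String) (d : PySem.Dict String Int) (acc : List Int) : Prop :=
  (∀ s, d.contains s = true ↔ s ∈ q) ∧
  (∀ s v, d.get? s = some v → v < (d.size : Int)) ∧
  (∀ s t v, d.get? s = some v → d.get? t = some v → s = t) ∧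
  (acc.length = q.length ∧
   ∀ i (h1 : i < q.length) (h2 : i < acc.length), d.get? q[i] = some acc[i])

theorem pvInv_step (q : List String) (d : PySem.Dict String Int) (acc : List Int) (x : String)
    (hI : pvInv q d acc) : pvInv (q ++ [x]) (pvStep (d, acc) x).1 (pvStep (d, acc) x).2 := by
  obtain ⟨h1, h2, h3, hlen, h4⟩ := hI
  by_cases hc : d.contains x = true
  · -- row already present: dict unchanged, its id is appended
    obtain ⟨v, hv⟩ : ∃ v, d.get? x = some v := by
      have := PySem.Dict.contains_eq_isSome_get? (d := d) (k := x)
      rw [hc] at this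
      exact Option.isSome_iff_exists.mp this.symm
    have hgetD : d.getD x 0 = v := PySem.Dict.getD_of_get?_eq_some _ _ hv
    refine ⟨?_, ?_, ?_, ?_, ?_⟩ <;> simp only [pvStep, hc, if_true]
    · intro s
      have hxq : x ∈ q := (h1 x).mp hc
      rw [h1]
      simp only [List.mem_append, List.mem_singleton]
      constructor
      · exact Or.inl
      · rintro (h | rfl)
        · exact h
        · exact hxq
    · exact h2
    · exact h3
    · simpa using hlen
    · intro i hi1 hi2
      rcases Nat.lt_or_ge i q.length with hlt | hge
      · rw [List.getElem_append_left hlt, List.getElem_append_left (by omega)]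
        exact h4 i hlt (by omega)
      · have hieq : i = q.length := by simp at hi1; omega
        subst hieq
        rw [List.getElem_append_right le_rfl, List.getElem_append_right (by omega)]
        simp [hlen, hgetD, hv]
  · -- fresh row: it gets id d.size, which is distinct from every existing id
    have hxq : x ∉ q := fun hm => hc ((h1 x).mpr hm)
    have hc' : d.contains x = false := by simpa using hc
    refine ⟨?_, ?_, ?_, ?_, ?_⟩ <;>
      simp only [pvStep, hc', Bool.false_eq_true, if_false]
    · intro s
      rw [PySem.Dict.contains_insert]
      simp only [Bool.or_eq_true, beq_iff_eq, List.mem_append, List.mem_singleton, h1]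
      tauto
    · intro s v hs
      rw [PySem.Dict.get?_insert] at hs
      rw [PySem.Dict.size_insert]
      simp only [hc', Bool.false_eq_true, if_false]
      by_cases hsx : s = x
      · rw [if_pos hsx] at hs
        have hv : v = (d.size : Int) := by injection hs with h; omega
        push_cast
        omega
      · rw [if_neg hsx] at hs
        have := h2 s v hs
        push_cast
        omega
    · intro s t v hs ht
      rw [PySem.Dict.get?_insert] at hs ht
      by_cases hsx : s = x <;> by_cases htx : t = x
      · rw [hsx, htx]
      · rw [if_pos hsx] at hs
        rw [if_neg htx] at ht
        have hv : v = (d.size : Int) := by injection hs with h; omega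
        have := h2 t v ht
        omega
      · rw [if_neg hsx] at hs
        rw [if_pos htx] at ht
        have hv : v = (d.size : Int) := by injection ht with h; omega
        have := h2 s v hs
        omega
      · rw [if_neg hsx] at hs
        rw [if_neg htx] at ht
        exact h3 s t v hs ht
    · simpa using hlen
    · intro i hi1 hi2
      rcases Nat.lt_or_ge i q.length with hlt | hge
      · rw [List.getElem_append_left hlt, List.getElem_append_left (by omega)]
        have hmem : q[i] ∈ q := List.getElem_mem hlt
        have hne : q[i] ≠ x := fun he => hxq (he ▸ hmem)
        rw [PySem.Dict.get?_insert, if_neg hne]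
        exact h4 i hlt (by omega)
      · have hieq : i = q.length := by simp at hi1; omega
        subst hieq
        rw [List.getElem_append_right le_rfl, List.getElem_append_right (by omega)]
        simp only [hlen, Nat.sub_self, List.getElem_singleton]
        rw [PySem.Dict.getD_of_get?_eq_some _ _ (PySem.Dict.get?_insert_self d x _),
            PySem.Dict.get?_insert_self]

theorem pvInv_fold (l q : List String) (d : PySem.Dict String Int) (acc : List Int)
    (hI : pvInv q d acc) :
    pvInv (q ++ l) (l.foldl pvStep (d, acc)).1 (l.foldl pvStep (d, acc)).2 := by
  induction l generalizing q d acc with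
  | nil => simpa using hI
  | cons x xs ih =>
      have h1 := pvInv_step q d acc x hI
      have h2 := ih (q ++ [x]) (pvStep (d, acc) x).1 (pvStep (d, acc) x).2 h1
      simpa using h2

theorem pvInv_assign (p : List String) : pvInv p (pvAssign p).1 (pvAssign p).2 := by
  have h := pvInv_fold p [] PySem.Dict.empty [] (by
    refine ⟨?_, ?_, ?_, ?_⟩ <;> simp [PySem.Dict.contains_empty, PySem.Dict.get?_empty])
  simpa [pvAssign] using h

theorem pvRids_length (p : List String) : (pvAssign p).2.length = p.length :=
  (pvInv_assign p).2.2.2.1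

-- the ids are a faithful encoding: two positions carry equal ids iff the rows are equal
theorem pvRids_faithful (p : List String) (i j : Nat) (hi : i < p.length) (hj : j < p.length) :
    ((pvAssign p).2[i]'(by rw [pvRids_length]; omega) = (pvAssign p).2[j]'(by rw [pvRids_length]; omega))
      ↔ p[i] = p[j] := by
  obtain ⟨h1, h2, h3, hlen, h4⟩ := pvInv_assign p
  have hgi := h4 i hi (by omega)
  have hgj := h4 j hj (by omega)
  constructor
  · intro he
    exact h3 _ _ _ hgi (he ▸ hgj)
  · intro he
    rw [he] at hgi
    rw [hgi] at hgj
    exact (Option.some.injEq _ _).mp hgj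

-- A's per-axis test, characterised pointwise
theorem pvAllEq_iff (p : List String) (k : Nat) (hk : k ≤ p.length) :
    pvAllEq ((p.take k).reverse) (p.drop k) = true
      ↔ ∀ t (h1 : t < k) (h2 : t < p.length - k),
          p[k - 1 - t]'(by omega) = p[k + t]'(by omega) := by
  unfold pvAllEq
  rw [List.all_eq_true]
  have hzlen : (((p.take k).reverse).zip (p.drop k)).length = min k (p.length - k) := by
    simp [Nat.min_eq_left hk]
  constructor
  · intro hall t h1 h2
    have ht : t < (((p.take k).reverse).zip (p.drop k)).length := by omega
    have hx := hall _ (List.getElem_mem ht)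
    rw [List.getElem_zip] at hx
    simp only [List.getElem_reverse, List.getElem_take, List.getElem_drop, beq_iff_eq,
      List.length_take, Nat.min_eq_left hk] at hx
    exact hx
  · intro h x hx
    obtain ⟨t, ht, rfl⟩ := List.mem_iff_getElem.mp hx
    rw [List.getElem_zip]
    simp only [beq_iff_eq, List.getElem_reverse, List.getElem_take, List.getElem_drop,
      List.length_take, Nat.min_eq_left hk]
    exact h t (by omega) (by omega)

-- B's expansion reaches a border iff all in-window pairs of ids match
theorem pvExpand_iff (rids : List Int) (n : Int) (hn : n = (rids.length : Int))
    (k t : Nat) (_hk : 1 ≤ k) (hkn : k < rids.length)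
    (ht : t ≤ min k (rids.length - k)) :
    ((pvExpand rids n ((k : Int) - 1 - t) ((k : Int) + t)).1 < 0 ∨
     (pvExpand rids n ((k : Int) - 1 - t) ((k : Int) + t)).2 = n)
      ↔ ∀ u (_h0 : t ≤ u) (h1 : u < k) (h2 : u < rids.length - k),
          rids[k - 1 - u]'(by omega) = rids[k + u]'(by omega) := by
  induction hm : min k (rids.length - k) - t generalizing t with
  | zero =>
      -- t = min k (len-k): the window is exhausted, a border has been reached
      have htm : t = min k (rids.length - k) := by omega
      rw [pvExpand]
      have hcond : ¬ (0 ≤ (k : Int) - 1 - t ∧ (k : Int) + t < n ∧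
          PySem.List.pyGet? rids ((k : Int) - 1 - t) == PySem.List.pyGet? rids ((k : Int) + t)) := by
        rintro ⟨hl, hr, -⟩
        omega
      rw [dif_neg hcond]
      simp only [hn]
      constructor
      · intro _ u _h0 h1 h2
        omega
      · intro _
        omega
  | succ m ih =>
      -- t < min k (len-k): both indices are in range; compare the two ids
      have htk : t < k := by omega
      have htn : t < rids.length - k := by omega
      have hlc : ((k - 1 - t : Nat) : Int) = (k : Int) - 1 - t := by omega
      have hrc : ((k + t : Nat) : Int) = (k : Int) + t := by omega
      have hgl : PySem.List.pyGet? rids ((k : Int) - 1 - t) = some (rids[k - 1 - t]'(by omega)) := by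
        rw [← hlc, PySem.List.pyGet?_natCast, List.getElem?_eq_getElem (by omega)]
      have hgr : PySem.List.pyGet? rids ((k : Int) + t) = some (rids[k + t]'(by omega)) := by
        rw [← hrc, PySem.List.pyGet?_natCast, List.getElem?_eq_getElem (by omega)]
      rw [pvExpand]
      by_cases heq : rids[k - 1 - t]'(by omega) = rids[k + t]'(by omega)
      · have hcond : 0 ≤ (k : Int) - 1 - t ∧ (k : Int) + t < n ∧
            PySem.List.pyGet? rids ((k : Int) - 1 - t) == PySem.List.pyGet? rids ((k : Int) + t) := by
          refine ⟨by omega, by omega, ?_⟩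
          rw [hgl, hgr, heq]
          simp
        rw [dif_pos hcond]
        have harg1 : (k : Int) - 1 - t - 1 = (k : Int) - 1 - (t + 1 : Nat) := by push_cast; ring
        have harg2 : (k : Int) + t + 1 = (k : Int) + (t + 1 : Nat) := by push_cast; ring
        rw [harg1, harg2, ih (t + 1) (by omega) (by omega)]
        constructor
        · intro h u h0 h1 h2
          rcases Nat.eq_or_lt_of_le h0 with rfl | hlt
          · exact heq
          · exact h u hlt h1 h2
        · intro h u h0 h1 h2
          exact h u (by omega) h1 h2
      · have hcond : ¬ (0 ≤ (k : Int) - 1 - t ∧ (k : Int) + t < n ∧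
            PySem.List.pyGet? rids ((k : Int) - 1 - t) == PySem.List.pyGet? rids ((k : Int) + t)) := by
          rintro ⟨-, -, hbeq⟩
          rw [hgl, hgr] at hbeq
          exact heq (by simpa using hbeq)
        rw [dif_neg hcond]
        constructor
        · intro h
          omega
        · intro h
          exact absurd (h t le_rfl htk htn) heq

-- the two outer loops agree from any axis k on
theorem pvLoop_eq (p : List String) (k : Nat) (hk : 1 ≤ k) (hkn : k ≤ p.length) :
    pvLoopA p (PySem.List.pyRange ((k : Int) - 1) ((p.length : Int) - 1) 1)
      = pvScan (pvAssign p).2 ((p.length : Int)) (k : Int) := by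
  have hrl : (pvAssign p).2.length = p.length := pvRids_length p
  induction hm : p.length - k generalizing k with
  | zero =>
      have hke : k = p.length := by omega
      subst hke
      rw [PySem.List.pyRange_one_eq_nil (by omega)]
      rw [pvScan, dif_neg (by omega)]
      simp [pvLoopA]
  | succ m ih =>
      have hklt : k < p.length := by omega
      rw [PySem.List.pyRange_one_cons (by omega : (k : Int) - 1 < (p.length : Int) - 1)]
      rw [pvScan, dif_pos (by omega : (k : Int) < (p.length : Int))]
      have hcast : (k : Int) - 1 + 1 = ((k : Nat) : Int) := by omega
      have hslice_to : PySem.List.slice p none (some ((k : Int) - 1 + 1)) = p.take k := by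
        rw [hcast, PySem.List.slice_to_natCast]
      have hslice_from : PySem.List.slice p (some ((k : Int) - 1 + 1)) none = p.drop k := by
        rw [hcast, PySem.List.slice_from_natCast]
      have hA := pvAllEq_iff p k (le_of_lt hklt)
      have hB := pvExpand_iff (pvAssign p).2 ((p.length : Int)) (by rw [hrl]) k 0
        hk (by omega) (by omega)
      simp only [Nat.cast_zero, Int.sub_zero, Int.add_zero] at hB
      -- the two per-axis tests agree (translating ids back to rows)
      have hiff : pvAllEq ((p.take k).reverse) (p.drop k) = true ↔
          ((pvExpand (pvAssign p).2 ((p.length : Int)) ((k : Int) - 1) (k : Int)).1 < 0 ∨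
           (pvExpand (pvAssign p).2 ((p.length : Int)) ((k : Int) - 1) (k : Int)).2
             = (p.length : Int)) := by
        rw [hA, hB]
        constructor
        · intro h u h0 h1 h2
          exact (pvRids_faithful p (k - 1 - u) (k + u) (by omega) (by omega)).mpr
            (h u h1 (by omega))
        · intro h t h1 h2
          exact (pvRids_faithful p (k - 1 - t) (k + t) (by omega) (by omega)).mp
            (h t (Nat.zero_le t) h1 (by omega))
      simp only [pvLoopA, hslice_to, hslice_from]
      by_cases hc : pvAllEq ((p.take k).reverse) (p.drop k) = true
      · rw [if_pos hc, if_pos (hiff.mp hc)]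
        simp only [Prod.mk.injEq, true_and]
        ring
      · rw [if_neg hc, if_neg (fun h => hc (hiff.mpr h))]
        have hk1 : (k : Int) - 1 + 1 = ((k + 1 : Nat) : Int) - 1 := by push_cast; ring
        have hk2 : (k : Int) + 1 = ((k + 1 : Nat) : Int) := by push_cast; ring
        rw [hk1, hk2]
        exact ih (k + 1) (by omega) (by omega) (by omega)

-- ===== VERDICT (by name: the statement is the Claim_ definition above) =====
theorem find_reflection_spec : Claim_equal_find_reflection := by
  intro pattern _
  unfold Spec_find_reflection find_reflection find_reflection_alt
  rcases Nat.eq_zero_or_pos pattern.length with h0 | hpos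
  · have hnil : pattern = [] := List.eq_nil_of_length_eq_zero h0
    subst hnil
    simp [pvLoopA, pvAssign, pvScan, PySem.List.pyRange]
  · have h := pvLoop_eq pattern 1 le_rfl hpos
    simp only []
    rw [pvRids_length]
    simpa using h
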